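-- pv_equiv track=rewrite | github.com/Maher-Amara/code-jam-2020 | Vestigium.py | dupliate_columns
-- ===== SOURCE A (Python) =====
-- def duplicate(tableau):
--     for elm in tableau:
--         if tableau.count(elm) != 1:
--             return True
--     return False
--
-- def dupliate_columns(matrix):
--     d_columns = 0
--     for i in range(len(matrix)):
--         column = list()
--         for line in matrix:
--             column +=[line[i]]
--         if duplicate(column):
--             d_columns += 1
--     return d_columns
-- ===== SOURCE B (Python) =====
-- def dupliate_columns(matrix):
--     d_columns = 0
--     for i in range(len(matrix)):
--         column = sorted(line[i] for line in matrix)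
--         has_dup = False
--         for a, b in zip(column, column[1:]):
--             if a == b:
--                 has_dup = True
--                 break
--         if has_dup:
--             d_columns += 1
--     return d_columns
-- ===== Notes on version B (the rewrite author's own statement) =====
-- stated objective: alternative
-- what changed: Per column, A calls list.count for every element (repeated-scan duplicate test, quadratic per column in the worst case); B sorts the column once and detects a duplicate by a single adjacent-pair scan; on duplicate-heavy inputs A's early return makes the two comparable in practice.
import Mathlib
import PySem

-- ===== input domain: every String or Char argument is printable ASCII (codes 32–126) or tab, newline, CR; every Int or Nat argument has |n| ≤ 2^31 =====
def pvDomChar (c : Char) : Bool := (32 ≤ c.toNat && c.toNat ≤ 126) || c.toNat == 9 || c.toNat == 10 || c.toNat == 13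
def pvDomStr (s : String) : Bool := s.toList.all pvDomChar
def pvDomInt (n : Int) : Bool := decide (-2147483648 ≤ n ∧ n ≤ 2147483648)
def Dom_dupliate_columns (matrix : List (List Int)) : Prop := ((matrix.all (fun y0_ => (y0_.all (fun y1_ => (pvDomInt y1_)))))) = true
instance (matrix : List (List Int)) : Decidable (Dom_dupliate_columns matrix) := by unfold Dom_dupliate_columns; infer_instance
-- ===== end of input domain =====

-- B replaces A's per-element list.count duplicate test by sort-then-adjacent-scan per column.

-- ===== PORT A =====
-- 'duplicate(tableau)': scan tableau, return True on the first element whose count ≠ 1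
def pyDuplicate (full : List Int) : List Int → Bool
  | [] => false
  | e :: rest => if PySem.List.count full e ≠ 1 then true else pyDuplicate full rest

def dupliate_columns (matrix : List (List Int)) : Int :=
  (PySem.List.pyRange 0 matrix.length 1).foldl (fun d i =>
    -- 'column += [line[i]]'; line[i] raises when out of range — excluded by Pre_, default 0 here
    let column := matrix.foldl (fun c line => c ++ [PySem.List.pyGetD line i 0]) []
    if pyDuplicate column column then d + 1 else d) 0

-- ===== PORT B =====
-- adjacent-pair scan over the sorted column ('for a, b in zip(column, column[1:])')
def hasAdjDup : List Int → Bool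
  | a :: b :: rest => if a == b then true else hasAdjDup (b :: rest)
  | _ => false

def dupliate_columns_alt (matrix : List (List Int)) : Int :=
  (PySem.List.pyRange 0 matrix.length 1).foldl (fun d i =>
    let column := PySem.List.sorted (matrix.map (fun line => PySem.List.pyGetD line i 0)) (fun x => x) false
    if hasAdjDup column then d + 1 else d) 0

-- ===== PRECONDITION & SPEC =====
-- Pre_ excludes exactly the inputs where A raises IndexError: some row shorter than the number of rows.
def Pre_dupliate_columns (matrix : List (List Int)) : Prop :=
  ∀ line ∈ matrix, matrix.length ≤ line.length
instance (matrix : List (List Int)) : Decidable (Pre_dupliate_columns matrix) := by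
  unfold Pre_dupliate_columns; infer_instance

def pvWitness_dupliate_columns : List (List Int) := [[1, 2], [1, 4]]

def Spec_dupliate_columns (matrix : List (List Int)) (out : Int) : Prop := out = dupliate_columns_alt matrix
instance (matrix : List (List Int)) (out : Int) : Decidable (Spec_dupliate_columns matrix out) := by unfold Spec_dupliate_columns; infer_instance

-- ===== CLAIM (what is proved, stated in full; the proofs are below) =====
def Claim_equal_dupliate_columns : Prop := ∀ (matrix : List (List Int)), Dom_dupliate_columns matrix → Pre_dupliate_columns matrix → Spec_dupliate_columns matrix (dupliate_columns matrix)

-- ===== LEMMAS AND PROOFS =====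

-- A's duplicate test is an 'any' over the list
theorem pyDuplicate_eq_any (full t : List Int) :
    pyDuplicate full t = t.any (fun e => decide (full.count e ≠ 1)) := by
  induction t with
  | nil => rfl
  | cons e rest ih =>
      simp [pyDuplicate, PySem.List.count_eq, List.any_cons, ih]

theorem pyDuplicate_self (c : List Int) :
    pyDuplicate c c = decide (¬ c.Nodup) := by
  rw [pyDuplicate_eq_any]
  by_cases h : c.Nodup
  · simp only [h, not_true_eq_false, decide_false, List.any_eq_false]
    intro e he
    simp [List.nodup_iff_count_eq_one.mp h e he]
  · simp only [h, not_false_eq_true, decide_true, List.any_eq_true]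
    have h' := mt List.nodup_iff_count_eq_one.mpr h
    push Not at h'
    obtain ⟨e, he, hc⟩ := h'
    exact ⟨e, he, by simp [hc]⟩

-- on a ≤-sorted list, an adjacent duplicate is the only kind of duplicate
theorem hasAdjDup_of_pairwise (l : List Int) (h : l.Pairwise (· ≤ ·)) :
    hasAdjDup l = decide (¬ l.Nodup) := by
  induction l with
  | nil => simp [hasAdjDup]
  | cons a t ih =>
      cases t with
      | nil => simp [hasAdjDup]
      | cons b rest =>
          rcases List.pairwise_cons.mp h with ⟨ha, ht⟩
          by_cases hab : a = b
          · subst hab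
            simp [hasAdjDup, List.nodup_cons]
          · have hrec := ih ht
            have hna : a ∉ b :: rest := by
              intro hmem
              rcases List.mem_cons.mp hmem with rfl | hmem
              · exact hab rfl
              · rcases List.pairwise_cons.mp ht with ⟨hb, _⟩
                have h1 : a ≤ b := ha b (List.mem_cons_self ..)
                have h2 : b ≤ a := hb a hmem
                exact hab (le_antisymm h1 h2)
            simp [hasAdjDup, hab, hrec, List.nodup_cons, hna]

theorem column_test_eq (c : List Int) :
    pyDuplicate c c = hasAdjDup (PySem.List.sorted c (fun x => x) false) := by
  rw [pyDuplicate_self, hasAdjDup_of_pairwise _ (PySem.List.sorted_pairwise c (fun x => x))]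
  have hperm := PySem.List.sorted_perm c (fun x => x) false
  simp [hperm.nodup_iff]

theorem column_build_eq (matrix : List (List Int)) (i : Int) :
    matrix.foldl (fun c line => c ++ [PySem.List.pyGetD line i 0]) [] =
      matrix.map (fun line => PySem.List.pyGetD line i 0) :=
  PySem.List.foldl_append_singleton_eq_map ..

-- ===== VERDICT (by name: the statement is the Claim_ definition above) =====
theorem dupliate_columns_spec : Claim_equal_dupliate_columns := by
  intro matrix _ _
  unfold Spec_dupliate_columns dupliate_columns dupliate_columns_alt
  congr 1
  funext d i
  dsimp only
  rw [column_build_eq, column_test_eq]
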